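-- pv_equiv track=rewrite | github.com/rdrmic/think-columns | grid.py | create_searchflow
-- ===== SOURCE A (Python) =====
-- def create_searchflow(x_fields, y_fields):
--     separator = x_fields, 0
--
--     f_hor = []
--     for y in range(y_fields):
--         for x in range(x_fields):
--             f_hor.append((x, y))
--         f_hor.append(separator)
--
--     f_vert = []
--     for x in range(x_fields):
--         for y in range(y_fields):
--             f_vert.append((x, y))
--         f_vert.append(separator)
--
--     f_slash = []
--     for x in range(2, x_fields):
--         y = 0
--         while x > -1 and y < y_fields:
--             f_slash.append((x, y))
--             x -= 1
--             y += 1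
--         f_slash.append(separator)
--     for y in range(1, y_fields - 2):
--         x = x_fields - 1
--         while x > -1 and y < y_fields:
--             f_slash.append((x, y))
--             x -= 1
--             y += 1
--         f_slash.append(separator)
--
--     f_bslash = []
--     for x in range(x_fields - 3, 0, -1):
--         y = 0
--         while x < x_fields and y < y_fields:
--             f_bslash.append((x, y))
--             x += 1
--             y += 1
--         f_bslash.append(separator)
--     for y in range(y_fields - 2):
--         x = 0
--         while x < x_fields and y < y_fields:
--             f_bslash.append((x, y))
--             x += 1
--             y += 1
--         f_bslash.append(separator)
--
--     return f_hor, f_vert, f_slash, f_bslash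
-- ===== SOURCE B (Python) =====
-- def create_searchflow(x_fields, y_fields):
--     sep = (x_fields, 0)
--
--     # One pass over the grid buckets every cell into four dicts keyed by
--     # row y, column x, anti-diagonal index x+y and diagonal index x-y;
--     # the four flows are then assembled purely by key lookup.
--     rows, cols, anti, diag = {}, {}, {}, {}
--     for y in range(y_fields):
--         for x in range(x_fields):
--             c = (x, y)
--             rows.setdefault(y, []).append(c)
--             cols.setdefault(x, []).append(c)
--             anti.setdefault(x + y, []).append(c)
--             diag.setdefault(x - y, []).append(c)
--
--     f_hor = []
--     for y in range(y_fields):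
--         f_hor += rows.get(y, []) + [sep]
--     f_vert = []
--     for x in range(x_fields):
--         f_vert += cols.get(x, []) + [sep]
--     f_slash = []
--     for s in range(2, x_fields):
--         f_slash += anti.get(s, []) + [sep]
--     for s in range(x_fields, x_fields + y_fields - 3):
--         f_slash += anti.get(s, []) + [sep]
--     f_bslash = []
--     for d in range(x_fields - 3, 0, -1):
--         f_bslash += diag.get(d, []) + [sep]
--     for y in range(y_fields - 2):
--         f_bslash += diag.get(-y, []) + [sep]
--     return f_hor, f_vert, f_slash, f_bslash
-- ===== Notes on version B (the rewrite author's own statement) =====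
-- stated objective: alternative
-- what changed: Instead of walking each line cell-by-cell with while-loops, B makes one pass over the grid bucketing every cell into four dicts keyed by row, column, anti-diagonal index x+y and diagonal index x-y, and then assembles each flow by pure key lookup over the required index ranges.
import Mathlib
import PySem

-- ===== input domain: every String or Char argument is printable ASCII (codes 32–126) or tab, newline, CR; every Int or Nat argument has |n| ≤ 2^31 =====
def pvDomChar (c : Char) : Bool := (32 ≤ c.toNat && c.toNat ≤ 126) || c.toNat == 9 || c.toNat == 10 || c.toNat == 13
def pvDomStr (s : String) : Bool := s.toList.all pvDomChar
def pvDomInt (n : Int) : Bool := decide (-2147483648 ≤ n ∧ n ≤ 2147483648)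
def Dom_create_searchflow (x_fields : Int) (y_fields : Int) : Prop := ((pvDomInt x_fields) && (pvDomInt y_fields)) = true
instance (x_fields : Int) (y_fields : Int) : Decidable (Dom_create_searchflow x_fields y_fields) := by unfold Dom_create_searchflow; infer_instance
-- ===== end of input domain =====

-- B buckets all cells into four dicts (row / column / x+y / x-y) in one grid pass and
-- assembles each flow by key lookup (objective: alternative decomposition, same cost).

-- ===== PORT A =====
-- the 'while x > -1 and y < y_fields: append (x,y); x -= 1; y += 1' walk
def slashWalk (y_fields : Int) (x y : Int) (acc : List (Int × Int)) : List (Int × Int) :=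
  if x > -1 ∧ y < y_fields then slashWalk y_fields (x - 1) (y + 1) (acc ++ [(x, y)]) else acc
termination_by (x + 1).toNat
decreasing_by omega

-- the 'while x < x_fields and y < y_fields: append (x,y); x += 1; y += 1' walk
def bslashWalk (x_fields y_fields : Int) (x y : Int) (acc : List (Int × Int)) : List (Int × Int) :=
  if x < x_fields ∧ y < y_fields then bslashWalk x_fields y_fields (x + 1) (y + 1) (acc ++ [(x, y)]) else acc
termination_by (x_fields - x).toNat
decreasing_by omega

def create_searchflow (x_fields : Int) (y_fields : Int) : (List (Int × Int)) × (List (Int × Int)) × (List (Int × Int)) × (List (Int × Int)) :=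
  let separator : Int × Int := (x_fields, 0)
  let f_hor := (PySem.List.pyRange 0 y_fields 1).foldl (fun acc y =>
      ((PySem.List.pyRange 0 x_fields 1).foldl (fun acc x => acc ++ [(x, y)]) acc) ++ [separator]) []
  let f_vert := (PySem.List.pyRange 0 x_fields 1).foldl (fun acc x =>
      ((PySem.List.pyRange 0 y_fields 1).foldl (fun acc y => acc ++ [(x, y)]) acc) ++ [separator]) []
  let f_slash := (PySem.List.pyRange 2 x_fields 1).foldl (fun acc x =>
      slashWalk y_fields x 0 acc ++ [separator]) []
  let f_slash := (PySem.List.pyRange 1 (y_fields - 2) 1).foldl (fun acc y =>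
      slashWalk y_fields (x_fields - 1) y acc ++ [separator]) f_slash
  let f_bslash := (PySem.List.pyRange (x_fields - 3) 0 (-1)).foldl (fun acc x =>
      bslashWalk x_fields y_fields x 0 acc ++ [separator]) []
  let f_bslash := (PySem.List.pyRange 0 (y_fields - 2) 1).foldl (fun acc y =>
      bslashWalk x_fields y_fields 0 y acc ++ [separator]) f_bslash
  (f_hor, f_vert, f_slash, f_bslash)

-- ===== PORT B =====
-- d.setdefault(k, []).append(c)
def bucketAdd (d : PySem.Dict Int (List (Int × Int))) (k : Int) (c : Int × Int) :
    PySem.Dict Int (List (Int × Int)) :=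
  d.modify k [] (· ++ [c])

-- the single grid pass building the four dicts (rows, cols, anti, diag)
def buildBuckets (x_fields y_fields : Int) :
    PySem.Dict Int (List (Int × Int)) × PySem.Dict Int (List (Int × Int)) ×
    PySem.Dict Int (List (Int × Int)) × PySem.Dict Int (List (Int × Int)) :=
  (PySem.List.pyRange 0 y_fields 1).foldl (fun st y =>
    (PySem.List.pyRange 0 x_fields 1).foldl (fun st x =>
      (bucketAdd st.1 y (x, y), bucketAdd st.2.1 x (x, y),
       bucketAdd st.2.2.1 (x + y) (x, y), bucketAdd st.2.2.2 (x - y) (x, y))) st)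
    (PySem.Dict.empty, PySem.Dict.empty, PySem.Dict.empty, PySem.Dict.empty)

def create_searchflow_alt (x_fields : Int) (y_fields : Int) : (List (Int × Int)) × (List (Int × Int)) × (List (Int × Int)) × (List (Int × Int)) :=
  let sep : Int × Int := (x_fields, 0)
  let st := buildBuckets x_fields y_fields
  let rows := st.1
  let cols := st.2.1
  let anti := st.2.2.1
  let diag := st.2.2.2
  let f_hor := (PySem.List.pyRange 0 y_fields 1).foldl (fun acc y => acc ++ rows.getD y [] ++ [sep]) []
  let f_vert := (PySem.List.pyRange 0 x_fields 1).foldl (fun acc x => acc ++ cols.getD x [] ++ [sep]) []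
  let f_slash := (PySem.List.pyRange 2 x_fields 1).foldl (fun acc s => acc ++ anti.getD s [] ++ [sep]) []
  let f_slash := (PySem.List.pyRange x_fields (x_fields + y_fields - 3) 1).foldl (fun acc s => acc ++ anti.getD s [] ++ [sep]) f_slash
  let f_bslash := (PySem.List.pyRange (x_fields - 3) 0 (-1)).foldl (fun acc dd => acc ++ diag.getD dd [] ++ [sep]) []
  let f_bslash := (PySem.List.pyRange 0 (y_fields - 2) 1).foldl (fun acc y => acc ++ diag.getD (-y) [] ++ [sep]) f_bslash
  (f_hor, f_vert, f_slash, f_bslash)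

-- ===== PRECONDITION & SPEC =====
def Spec_create_searchflow (x_fields : Int) (y_fields : Int) (out : (List (Int × Int)) × (List (Int × Int)) × (List (Int × Int)) × (List (Int × Int))) : Prop := out = create_searchflow_alt x_fields y_fields
instance (x_fields : Int) (y_fields : Int) (out : (List (Int × Int)) × (List (Int × Int)) × (List (Int × Int)) × (List (Int × Int))) : Decidable (Spec_create_searchflow x_fields y_fields out) := by unfold Spec_create_searchflow; infer_instance

-- ===== CLAIM (what is proved, stated in full; the proofs are below) =====
def Claim_equal_create_searchflow : Prop := ∀ (x_fields : Int) (y_fields : Int), Dom_create_searchflow x_fields y_fields → Spec_create_searchflow x_fields y_fields (create_searchflow x_fields y_fields)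

-- ===== LEMMAS AND PROOFS =====

-- the grid cell list, row-major (the order in which B's single pass visits cells)
def cellsOf (xf yf : Int) : List (Int × Int) :=
  (PySem.List.pyRange 0 yf 1).flatMap (fun y => (PySem.List.pyRange 0 xf 1).map (fun x => (x, y)))

lemma foldl_cells {S : Type} (xf : Int) (ys : List Int) (step : S → Int → Int → S) (init : S) :
    ys.foldl (fun st y => (PySem.List.pyRange 0 xf 1).foldl (fun st x => step st x y) st) init
      = (ys.flatMap (fun y => (PySem.List.pyRange 0 xf 1).map (fun x => (x, y)))).foldl
          (fun st c => step st c.1 c.2) init := by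
  induction ys generalizing init with
  | nil => rfl
  | cons y ys ih =>
    simp only [List.foldl_cons, List.flatMap_cons, List.foldl_append]
    rw [ih]
    congr 1
    rw [List.foldl_map]

lemma foldl_prod4 {S1 S2 S3 S4 γ : Type} (l : List γ)
    (f1 : S1 → γ → S1) (f2 : S2 → γ → S2) (f3 : S3 → γ → S3) (f4 : S4 → γ → S4)
    (a : S1) (b : S2) (c : S3) (d : S4) :
    l.foldl (fun st x => (f1 st.1 x, f2 st.2.1 x, f3 st.2.2.1 x, f4 st.2.2.2 x)) (a, b, c, d)
      = (l.foldl f1 a, l.foldl f2 b, l.foldl f3 c, l.foldl f4 d) := by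
  induction l generalizing a b c d with
  | nil => rfl
  | cons x l ih => simp [ih]

lemma getD_bucketFold (κ : (Int × Int) → Int) (l : List (Int × Int)) (k : Int) :
    (l.foldl (fun d c => bucketAdd d (κ c) c) PySem.Dict.empty).getD k []
      = l.filter (fun c => κ c == k) := by
  have h : l.foldl (fun d c => bucketAdd d (κ c) c) PySem.Dict.empty
      = (l.map (fun c => (κ c, c))).foldl (fun d p => d.modify p.1 [] (· ++ [p.2])) PySem.Dict.empty := by
    rw [List.foldl_map]; rfl
  rw [h, PySem.Dict.getD_foldl_modify_append]
  simp [List.filter_map, List.map_map, Function.comp_def]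

lemma buildBuckets_eq (xf yf : Int) :
    buildBuckets xf yf =
      ((cellsOf xf yf).foldl (fun d c => bucketAdd d c.2 c) PySem.Dict.empty,
       (cellsOf xf yf).foldl (fun d c => bucketAdd d c.1 c) PySem.Dict.empty,
       (cellsOf xf yf).foldl (fun d c => bucketAdd d (c.1 + c.2) c) PySem.Dict.empty,
       (cellsOf xf yf).foldl (fun d c => bucketAdd d (c.1 - c.2) c) PySem.Dict.empty) := by
  unfold buildBuckets cellsOf
  rw [foldl_cells xf (PySem.List.pyRange 0 yf 1)
      (fun st x y => (bucketAdd st.1 y (x, y), bucketAdd st.2.1 x (x, y),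
        bucketAdd st.2.2.1 (x + y) (x, y), bucketAdd st.2.2.2 (x - y) (x, y)))]
  exact foldl_prod4 _ (fun d (c : Int × Int) => bucketAdd d c.2 (c.1, c.2)) (fun d (c : Int × Int) => bucketAdd d c.1 (c.1, c.2))
    (fun d (c : Int × Int) => bucketAdd d (c.1 + c.2) (c.1, c.2)) (fun d (c : Int × Int) => bucketAdd d (c.1 - c.2) (c.1, c.2)) _ _ _ _

-- filter of an increasing integer range by equality with a single value
lemma filter_beq_range (a v : Int) : ∀ (n : Nat),
    (((List.range n).map (fun k : Nat => a + (k : Int))).filter (fun x => x == v))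
      = if a ≤ v ∧ v < a + n then [v] else [] := by
  intro n
  induction n with
  | zero =>
    have h0 : ¬ (a ≤ v ∧ v < a + ((0 : Nat) : Int)) := by omega
    simp only [List.range_zero, List.map_nil, List.filter_nil, if_neg h0]
  | succ n ih =>
    rw [List.range_succ, List.map_append, List.filter_append, ih]
    by_cases hv : a + (n : Int) = v
    · have h1 : ¬ (a ≤ v ∧ v < a + (n : Int)) := by omega
      have h2 : a ≤ v ∧ v < a + ((n + 1 : Nat) : Int) := by push_cast; omega
      have h3 : ((a + (n : Int)) == v) = true := by simpa using hv
      rw [if_neg h1, if_pos h2]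
      simp only [List.map_cons, List.map_nil, List.filter_cons, h3, if_true, List.filter_nil,
        List.nil_append]
      simp [hv]
    · have h3 : ((a + (n : Int)) == v) = false := by simpa using hv
      have h5 : (a ≤ v ∧ v < a + ((n + 1 : Nat) : Int)) ↔ (a ≤ v ∧ v < a + (n : Int)) := by
        push_cast; omega
      simp only [List.map_cons, List.map_nil, List.filter_cons, h3, Bool.false_eq_true, if_false,
        List.filter_nil, List.append_nil]
      rw [if_congr h5 rfl rfl]

lemma filter_beq_pyRange (a b v : Int) :
    (PySem.List.pyRange a b 1).filter (fun x => x == v) = if a ≤ v ∧ v < b then [v] else [] := by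
  rw [PySem.List.pyRange_one, filter_beq_range a v]
  have h : (a ≤ v ∧ v < a + ((b - a).toNat : Int)) ↔ (a ≤ v ∧ v < b) := by omega
  rw [if_congr h rfl rfl]

-- pick out the one matching index of a range
lemma flatMap_ite_single {β : Type} (v : Int) (g : Int → List β) : ∀ (n : Nat), 0 ≤ v → v < n →
    (List.range n).flatMap (fun y : Nat => if (y : Int) = v then g y else []) = g v := by
  intro n
  induction n with
  | zero => intro _ h; simp at h; omega
  | succ n ih =>
    intro h0 h1
    rw [List.range_succ, List.flatMap_append]
    by_cases hv : v = (n : Int)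
    · have hnil : (List.range n).flatMap (fun y : Nat => if (y : Int) = v then g y else []) = [] := by
        apply List.flatMap_eq_nil_iff.mpr
        intro x hx
        have hxn := List.mem_range.mp hx
        have : (x : Int) ≠ v := by omega
        simp [this]
      rw [hnil]
      simp [← hv]
    · have hlt : v < (n : Int) := by push_cast at h1; omega
      rw [ih h0 hlt]
      have : ¬ ((n : Int) = v) := fun h => hv h.symm
      simp [this]

-- collect a window of indices: the surviving y form exactly the subrange [max 0 a, min n b)
lemma flatMap_window {β : Type} (a b : Int) (g : Int → List β) : ∀ (n : Nat),
    (List.range n).flatMap (fun y : Nat => if a ≤ (y : Int) ∧ (y : Int) < b then g y else [])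
      = ((List.range (min (n : Int) b - max 0 a).toNat).map (fun k : Nat => max 0 a + (k : Int))).flatMap g := by
  intro n
  induction n with
  | zero =>
    simp
    intro k hk
    exfalso
    omega
  | succ n ih =>
    rw [List.range_succ, List.flatMap_append, ih]
    by_cases hc : a ≤ (n : Int) ∧ (n : Int) < b
    · have hL : (min ((n + 1 : Nat) : Int) b - max 0 a).toNat
          = (min ((n : Nat) : Int) b - max 0 a).toNat + 1 := by push_cast; omega
      rw [hL, List.range_succ, List.map_append, List.flatMap_append]
      simp [hc]
      congr 1
      omega
    · have hL : (min ((n + 1 : Nat) : Int) b - max 0 a).toNat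
          = (min ((n : Nat) : Int) b - max 0 a).toNat := by push_cast; omega
      rw [hL]
      simp [hc]

-- closed form of A's two diagonal walks
lemma slashWalk_eq (yf x y : Int) (acc : List (Int × Int)) :
    slashWalk yf x y acc
      = acc ++ (List.range (min (x + 1) (yf - y)).toNat).map (fun k : Nat => (x - k, y + k)) := by
  fun_induction slashWalk yf x y acc with
  | case1 x y acc h ih =>
    rw [ih]
    have hn : (min (x + 1) (yf - y)).toNat = (min x (yf - (y + 1))).toNat + 1 := by omega
    rw [hn, List.range_succ_eq_map, List.map_cons, List.map_map, List.append_assoc,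
        List.cons_append, List.nil_append]
    congr 2
    · norm_num
    have hx : x - 1 + 1 = x := by ring
    rw [hx]
    apply List.map_congr_left
    intro k _
    simp only [Function.comp_apply, Nat.succ_eq_add_one, Prod.mk.injEq]
    push_cast
    constructor <;> ring
  | case2 x y acc h =>
    have : (min (x + 1) (yf - y)).toNat = 0 := by omega
    simp [this]

lemma bslashWalk_eq (xf yf x y : Int) (acc : List (Int × Int)) :
    bslashWalk xf yf x y acc
      = acc ++ (List.range (min (xf - x) (yf - y)).toNat).map (fun k : Nat => (x + k, y + k)) := by
  fun_induction bslashWalk xf yf x y acc with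
  | case1 x y acc h ih =>
    rw [ih]
    have hn : (min (xf - x) (yf - y)).toNat = (min (xf - (x + 1)) (yf - (y + 1))).toNat + 1 := by omega
    rw [hn, List.range_succ_eq_map, List.map_cons, List.map_map, List.append_assoc,
        List.cons_append, List.nil_append]
    congr 2
    · norm_num
    apply List.map_congr_left
    intro k _
    simp only [Function.comp_apply, Nat.succ_eq_add_one, Prod.mk.injEq]
    push_cast
    constructor <;> ring
  | case2 x y acc h =>
    have : (min (xf - x) (yf - y)).toNat = 0 := by omega
    simp [this]

-- bucket contents -----------------------------------------------------------

lemma cells_filter (xf yf : Int) (κ : (Int × Int) → Int) (k : Int) :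
    (cellsOf xf yf).filter (fun c => κ c == k)
      = (List.range yf.toNat).flatMap (fun (y : Nat) =>
          (((PySem.List.pyRange 0 xf 1).filter (fun x => κ (x, (y : Int)) == k)).map
            (fun x => (x, (y : Int))))) := by
  unfold cellsOf
  rw [PySem.List.pyRange_one 0 yf]
  simp only [Int.sub_zero, List.flatMap_map, List.filter_flatMap]
  apply List.flatMap_congr
  intro y _
  rw [List.filter_map]
  simp [Function.comp_def]

lemma rows_bucket (xf yf y₀ : Int) (h0 : 0 ≤ y₀) (h1 : y₀ < yf) :
    (cellsOf xf yf).filter (fun c => c.2 == y₀)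
      = (PySem.List.pyRange 0 xf 1).map (fun x => (x, y₀)) := by
  rw [cells_filter]
  have hsel := flatMap_ite_single y₀
      (fun v => (PySem.List.pyRange 0 xf 1).map (fun x => (x, v))) yf.toNat h0 (by omega)
  refine Eq.trans ?_ hsel
  apply List.flatMap_congr
  intro y _
  by_cases hy : (y : Int) = y₀
  · simp [hy]
  · simp [hy]

lemma cols_bucket (xf yf x₀ : Int) (h0 : 0 ≤ x₀) (h1 : x₀ < xf) :
    (cellsOf xf yf).filter (fun c => c.1 == x₀)
      = (List.range yf.toNat).map (fun (y : Nat) => (x₀, (y : Int))) := by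
  rw [cells_filter]
  refine Eq.trans ?_ (List.map_eq_flatMap (f := fun (y : Nat) => (x₀, (y : Int))) (l := List.range yf.toNat)).symm
  apply List.flatMap_congr
  intro y _
  simp [filter_beq_pyRange, h0, h1]

lemma anti_bucket (xf yf s : Int) :
    (cellsOf xf yf).filter (fun c => c.1 + c.2 == s)
      = (List.range (min (yf.toNat : Int) (s + 1) - max 0 (s - xf + 1)).toNat).map
          (fun k : Nat => (s - (max 0 (s - xf + 1) + k), max 0 (s - xf + 1) + (k : Int))) := by
  rw [cells_filter]
  have hrow : ∀ y : Int, ((PySem.List.pyRange 0 xf 1).filter (fun x => x + y == s)).map (fun x => (x, y))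
      = if s - xf + 1 ≤ y ∧ y < s + 1 then [(s - y, y)] else [] := by
    intro y
    have hcg : (PySem.List.pyRange 0 xf 1).filter (fun x => x + y == s)
        = (PySem.List.pyRange 0 xf 1).filter (fun x => x == s - y) := by
      apply List.filter_congr
      intro x _
      rw [Bool.eq_iff_iff]
      simp only [beq_iff_eq]
      omega
    rw [hcg, filter_beq_pyRange]
    have : (0 ≤ s - y ∧ s - y < xf) ↔ (s - xf + 1 ≤ y ∧ y < s + 1) := by omega
    rw [if_congr this rfl rfl]
    split_ifs <;> simp
  have h1 : (List.range yf.toNat).flatMap (fun (y : Nat) =>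
        (((PySem.List.pyRange 0 xf 1).filter (fun x => (x, (y : Int)).1 + (x, (y : Int)).2 == s)).map
          (fun x => (x, (y : Int)))))
      = (List.range yf.toNat).flatMap (fun (y : Nat) =>
          if s - xf + 1 ≤ (y : Int) ∧ (y : Int) < s + 1 then (fun v : Int => [(s - v, v)]) (y : Int) else []) := by
    apply List.flatMap_congr
    intro y _
    exact hrow (y : Int)
  rw [h1, flatMap_window (s - xf + 1) (s + 1) (fun v : Int => [(s - v, v)]) yf.toNat]
  simp only [List.flatMap_map]
  exact List.map_eq_flatMap.symm

lemma diag_bucket (xf yf d : Int) :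
    (cellsOf xf yf).filter (fun c => c.1 - c.2 == d)
      = (List.range (min (yf.toNat : Int) (xf - d) - max 0 (-d)).toNat).map
          (fun k : Nat => (d + (max 0 (-d) + k), max 0 (-d) + (k : Int))) := by
  rw [cells_filter]
  have hrow : ∀ y : Int, ((PySem.List.pyRange 0 xf 1).filter (fun x => x - y == d)).map (fun x => (x, y))
      = if (-d) ≤ y ∧ y < xf - d then [(d + y, y)] else [] := by
    intro y
    have hcg : (PySem.List.pyRange 0 xf 1).filter (fun x => x - y == d)
        = (PySem.List.pyRange 0 xf 1).filter (fun x => x == d + y) := by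
      apply List.filter_congr
      intro x _
      rw [Bool.eq_iff_iff]
      simp only [beq_iff_eq]
      omega
    rw [hcg, filter_beq_pyRange]
    have : (0 ≤ d + y ∧ d + y < xf) ↔ ((-d) ≤ y ∧ y < xf - d) := by omega
    rw [if_congr this rfl rfl]
    split_ifs <;> simp
  have h1 : (List.range yf.toNat).flatMap (fun (y : Nat) =>
        (((PySem.List.pyRange 0 xf 1).filter (fun x => (x, (y : Int)).1 - (x, (y : Int)).2 == d)).map
          (fun x => (x, (y : Int)))))
      = (List.range yf.toNat).flatMap (fun (y : Nat) =>
          if (-d) ≤ (y : Int) ∧ (y : Int) < xf - d then (fun v : Int => [(d + v, v)]) (y : Int) else []) := by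
    apply List.flatMap_congr
    intro y _
    exact hrow (y : Int)
  rw [h1, flatMap_window (-d) (xf - d) (fun v : Int => [(d + v, v)]) yf.toNat]
  simp only [List.flatMap_map]
  exact List.map_eq_flatMap.symm

-- ===== VERDICT (by name: the statement is the Claim_ definition above) =====
theorem create_searchflow_spec : Claim_equal_create_searchflow := by
  intro xf yf _
  unfold Spec_create_searchflow create_searchflow create_searchflow_alt
  rw [buildBuckets_eq]
  simp only [getD_bucketFold, PySem.List.foldl_append_singleton_eq_map, slashWalk_eq, bslashWalk_eq,
    Prod.mk.injEq]
  refine ⟨?_, ?_, ?_, ?_⟩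
  · -- f_hor
    refine PySem.List.foldl_congr_mem _ _ _ _ ?_
    intro acc y hy
    obtain ⟨hy0, hy1⟩ := (PySem.List.mem_pyRange_one).mp hy
    rw [rows_bucket xf yf y hy0 hy1]
  · -- f_vert
    refine PySem.List.foldl_congr_mem _ _ _ _ ?_
    intro acc x hx
    obtain ⟨hx0, hx1⟩ := (PySem.List.mem_pyRange_one).mp hx
    rw [cols_bucket xf yf x hx0 hx1, PySem.List.pyRange_one 0 yf, List.map_map]
    congr 1
    congr 1
    refine List.ext_getElem ?_ ?_
    · simp only [List.length_map, List.length_range]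
      omega
    · intro i hi1 hi2
      simp [Function.comp_def]
  · -- f_slash
    have h1 : (PySem.List.pyRange 2 xf 1).foldl
          (fun acc x => acc ++ (List.range (min (x + 1) (yf - 0)).toNat).map (fun k : Nat => (x - (k : Int), 0 + (k : Int))) ++ [(xf, 0)]) []
        = (PySem.List.pyRange 2 xf 1).foldl
          (fun acc s => acc ++ (cellsOf xf yf).filter (fun c => c.1 + c.2 == s) ++ [(xf, 0)]) [] := by
      refine PySem.List.foldl_congr_mem _ _ _ _ ?_
      intro acc x hx
      obtain ⟨hx0, hx1⟩ := (PySem.List.mem_pyRange_one).mp hx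
      rw [anti_bucket xf yf x]
      congr 1
      congr 1
      refine List.ext_getElem ?_ ?_
      · simp only [List.length_map, List.length_range]
        omega
      · intro i hi1 hi2
        simp only [List.getElem_map, List.getElem_range, Prod.mk.injEq]
        constructor <;> omega
    rw [h1]
    rw [PySem.List.pyRange_one 1 (yf - 2), PySem.List.pyRange_one xf (xf + yf - 3),
      List.foldl_map, List.foldl_map]
    have hn : (xf + yf - 3 - xf).toNat = (yf - 2 - 1).toNat := by omega
    rw [hn]
    refine PySem.List.foldl_congr_mem _ _ _ _ ?_
    intro acc k hk
    have hkn := List.mem_range.mp hk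
    rw [anti_bucket xf yf (xf + (k : Int))]
    congr 1
    congr 1
    refine List.ext_getElem ?_ ?_
    · simp only [List.length_map, List.length_range]
      omega
    · intro i hi1 hi2
      simp only [List.getElem_map, List.getElem_range, Prod.mk.injEq]
      constructor <;> omega
  · -- f_bslash
    have h1 : (PySem.List.pyRange (xf - 3) 0 (-1)).foldl
          (fun acc x => acc ++ (List.range (min (xf - x) (yf - 0)).toNat).map (fun k : Nat => (x + (k : Int), 0 + (k : Int))) ++ [(xf, 0)]) []
        = (PySem.List.pyRange (xf - 3) 0 (-1)).foldl
          (fun acc dd => acc ++ (cellsOf xf yf).filter (fun c => c.1 - c.2 == dd) ++ [(xf, 0)]) [] := by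
      refine PySem.List.foldl_congr_mem _ _ _ _ ?_
      intro acc dd hd
      obtain ⟨hd0, hd1⟩ := (PySem.List.mem_pyRange_neg_one).mp hd
      rw [diag_bucket xf yf dd]
      congr 1
      congr 1
      refine List.ext_getElem ?_ ?_
      · simp only [List.length_map, List.length_range]
        omega
      · intro i hi1 hi2
        simp only [List.getElem_map, List.getElem_range, Prod.mk.injEq]
        constructor <;> omega
    rw [h1]
    refine PySem.List.foldl_congr_mem _ _ _ _ ?_
    intro acc y hy
    obtain ⟨hy0, hy1⟩ := (PySem.List.mem_pyRange_one).mp hy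
    rw [diag_bucket xf yf (-y)]
    congr 1
    congr 1
    refine List.ext_getElem ?_ ?_
    · simp only [List.length_map, List.length_range]
      omega
    · intro i hi1 hi2
      simp only [List.getElem_map, List.getElem_range, Prod.mk.injEq]
      constructor <;> omega
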